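-- pv_equiv track=rewrite | github.com/luoleicn/fasttext4fun | tools/20news_data_process.py | get_labeltree
-- ===== SOURCE A (Python) =====
-- def get_labeltree(num_leaves):
--     """
--     1:40
--     2:38~39
--     3:35~37
--     5:30~34
--     10:20~29
--     20:0~19
--     """
--     sons = [i for i in range(num_leaves)]
--     link = []
--     label_count = num_leaves
--
--     while len(sons) > 1:
--         fathers = []
--         for i in range(0, len(sons), 2):
--             left = sons[i]
--             right = -1 if len(sons) <= i + 1 else sons[i+1]
--             link.append((label_count, left, right))
--             fathers.append(label_count)
--             label_count += 1
--         sons = fathers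
--     return list(reversed(link)), label_count
-- ===== SOURCE B (Python) =====
-- def get_labeltree(num_leaves):
--     # Table-driven: precompute (size, start-id) per level, then emit links
--     # directly in final order (top level first, decreasing node index).
--     if num_leaves <= 1:
--         return [], num_leaves
--     levels = [(num_leaves, 0)]
--     s, start = num_leaves, 0
--     while s > 1:
--         start += s
--         s = (s + 1) // 2
--         levels.append((s, start))
--     label_count = start + s
--     links = []
--     for L in range(len(levels) - 1, 0, -1):
--         sL, stL = levels[L]
--         sP, stP = levels[L - 1]
--         for k in reversed(range(sL)):
--             c = stP + 2 * k
--             right = -1 if 2 * k + 1 >= sP else c + 1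
--             links.append((stL + k, c, right))
--     return links, label_count
-- ===== Notes on version B (the rewrite author's own statement) =====
-- stated objective: alternative
-- what changed: B replaces A's per-level construction of explicit sons/fathers id lists by a precomputed (size, start-id) table of the levels, then emits the links directly in the final order (top level first, decreasing node index) by pure index arithmetic, with no id lists and no final reverse.
import Mathlib
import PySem

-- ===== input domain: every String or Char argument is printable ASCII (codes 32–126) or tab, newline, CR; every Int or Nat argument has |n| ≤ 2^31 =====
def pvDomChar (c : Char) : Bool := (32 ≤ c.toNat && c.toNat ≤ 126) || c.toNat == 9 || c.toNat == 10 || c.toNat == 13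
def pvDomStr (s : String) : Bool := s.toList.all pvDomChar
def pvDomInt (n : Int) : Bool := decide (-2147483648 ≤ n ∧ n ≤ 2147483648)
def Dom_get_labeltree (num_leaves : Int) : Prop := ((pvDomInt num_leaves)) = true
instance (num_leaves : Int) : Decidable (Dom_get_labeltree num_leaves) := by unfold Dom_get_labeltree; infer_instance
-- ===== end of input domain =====

-- B replaces A's repeated level-scanning (building sons/fathers id lists per level)
-- by a precomputed (size, start-id) table per level and emits the links directly in
-- the final order (alternative decomposition; same asymptotic cost).

-- ===== PORT A =====
-- inner loop "for i in range(0, len(sons), 2)": consumes sons two at a time,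
-- returning (links appended this level, fathers, label_count)
def pvInnerA : List Int → Int → (List (Int × Int × Int)) × List Int × Int
  | [], lc => ([], [], lc)
  | [a], lc => ([(lc, a, -1)], [lc], lc + 1)
  | a :: b :: rest, lc =>
    let r := pvInnerA rest (lc + 1)
    ((lc, a, b) :: r.1, lc :: r.2.1, r.2.2)

-- needed by pvLoopA's termination: fathers are half as many as sons
theorem pvInnerA_len : ∀ (xs : List Int) (lc : Int), (pvInnerA xs lc).2.1.length = (xs.length + 1) / 2
  | [], _ => by simp [pvInnerA]
  | [_], _ => by simp [pvInnerA]
  | _ :: _ :: rest, lc => by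
      simp only [pvInnerA, List.length_cons, pvInnerA_len rest (lc + 1)]
      omega

-- while len(sons) > 1:
def pvLoopA (sons : List Int) (link : List (Int × Int × Int)) (lc : Int) :
    (List (Int × Int × Int)) × Int :=
  if sons.length > 1 then
    let r := pvInnerA sons lc
    pvLoopA r.2.1 (link ++ r.1) r.2.2
  else (link, lc)
termination_by sons.length
decreasing_by simp only [pvInnerA_len]; omega

def get_labeltree (num_leaves : Int) : (List (Int × Int × Int)) × Int :=
  let sons := PySem.List.pyRange 0 num_leaves 1
  let r := pvLoopA sons [] num_leaves
  (r.1.reverse, r.2)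

-- ===== PORT B =====
-- the while loop of Source B: builds the (size, start) level table and label_count
def pvBLoop (s start : Int) : (List (Int × Int)) × Int :=
  if s > 1 then
    let r := pvBLoop (PySem.Int.floordiv (s + 1) 2) (start + s)
    ((s, start) :: r.1, r.2)
  else ([(s, start)], start + s)
termination_by s.toNat
decreasing_by
  rename_i h
  rw [PySem.Int.floordiv_eq_ediv_of_pos (by omega)]
  omega

-- one level's links: "for k in reversed(range(sL)): ..."
def pvBRow (sL stL sP stP : Int) : List (Int × Int × Int) :=
  ((PySem.List.pyRange 0 sL 1).reverse).map (fun k =>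
    (stL + k, stP + 2 * k, if 2 * k + 1 ≥ sP then -1 else stP + 2 * k + 1))

-- "for L in range(len(levels)-1, 0, -1)": walk the reversed table pairing
-- each level with the one below it
def pvBEmit : List (Int × Int) → List (Int × Int × Int)
  | (sL, stL) :: (sP, stP) :: rest => pvBRow sL stL sP stP ++ pvBEmit ((sP, stP) :: rest)
  | _ => []

def get_labeltree_alt (num_leaves : Int) : (List (Int × Int × Int)) × Int :=
  if num_leaves ≤ 1 then ([], num_leaves)
  else
    let r := pvBLoop num_leaves 0
    (pvBEmit r.1.reverse, r.2)

-- ===== PRECONDITION & SPEC =====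
def Spec_get_labeltree (num_leaves : Int) (out : (List (Int × Int × Int)) × Int) : Prop := out = get_labeltree_alt num_leaves
instance (num_leaves : Int) (out : (List (Int × Int × Int)) × Int) : Decidable (Spec_get_labeltree num_leaves out) := by unfold Spec_get_labeltree; infer_instance

-- ===== CLAIM (what is proved, stated in full; the proofs are below) =====
def Claim_equal_get_labeltree : Prop := ∀ (num_leaves : Int), Dom_get_labeltree num_leaves → Spec_get_labeltree num_leaves (get_labeltree num_leaves)

-- ===== LEMMAS AND PROOFS =====

/-- ceil(n/2) -/
def pvCeil (n : Nat) : Nat := (n + 1) / 2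

/-- the id segment [st, st+1, …, st+n-1] -/
def pvSeg (st : Int) (n : Nat) : List Int := (List.range n).map (fun k : Nat => st + (k : Int))

/-- one level's links in A's (increasing-k) order: parents get ids lc, lc+1, … -/
def pvRowI (lc st : Int) (n : Nat) : List (Int × Int × Int) :=
  (List.range (pvCeil n)).map (fun k : Nat =>
    (lc + (k : Int), st + 2 * (k : Int), if 2 * k + 1 < n then st + 2 * (k : Int) + 1 else -1))

/-- all links (in A's append order) produced from a level of n ids starting at st -/
def pvAllRows (st : Int) (n : Nat) : List (Int × Int × Int) :=
  if n > 1 then pvRowI (st + n) st n ++ pvAllRows (st + n) (pvCeil n) else []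
termination_by n
decreasing_by simp only [pvCeil]; omega

/-- the final label count -/
def pvTot (st : Int) (n : Nat) : Int :=
  if n > 1 then pvTot (st + n) (pvCeil n) else st + n
termination_by n
decreasing_by simp only [pvCeil]; omega

/-- B's level table, Nat-indexed -/
def pvLev (st : Int) (n : Nat) : List (Int × Int) :=
  if n > 1 then ((n : Int), st) :: pvLev (st + n) (pvCeil n) else [((n : Int), st)]
termination_by n
decreasing_by simp only [pvCeil]; omega

theorem pvSeg_succ (st : Int) (n : Nat) : pvSeg st (n + 1) = st :: pvSeg (st + 1) n := by
  simp only [pvSeg, List.range_succ_eq_map, List.map_cons, List.map_map]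
  congr 1
  · simp
  · refine List.map_congr_left fun k _ => ?_
    simp only [Function.comp]; push_cast; ring

theorem pvRowI_succ2 (lc st : Int) (n : Nat) :
    pvRowI lc st (n + 2) = (lc, st, st + 1) :: pvRowI (lc + 1) (st + 2) n := by
  have h : pvCeil (n + 2) = pvCeil n + 1 := by simp only [pvCeil]; omega
  simp only [pvRowI, h, List.range_succ_eq_map, List.map_cons, List.map_map]
  congr 1
  · rw [if_pos (by omega)]; norm_num
  · refine List.map_congr_left fun k _ => ?_
    simp only [Function.comp, Prod.mk.injEq]
    by_cases hk : 2 * k + 1 < n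
    · rw [if_pos (by omega), if_pos hk]; push_cast; exact ⟨by ring, by ring, by ring⟩
    · rw [if_neg (by omega), if_neg hk]; push_cast; exact ⟨by ring, by ring, trivial⟩

theorem pvInnerA_seg : ∀ (n : Nat) (st lc : Int),
    pvInnerA (pvSeg st n) lc = (pvRowI lc st n, pvSeg lc (pvCeil n), lc + pvCeil n)
  | 0, st, lc => by simp [pvSeg, pvRowI, pvCeil, pvInnerA]
  | 1, st, lc => by
      simp [pvSeg, pvRowI, pvCeil, pvInnerA, List.range_succ]
  | n + 2, st, lc => by
      rw [pvSeg_succ, pvSeg_succ]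
      show pvInnerA (st :: (st + 1) :: pvSeg (st + 1 + 1) n) lc = _
      simp only [pvInnerA, pvInnerA_seg n (st + 1 + 1) (lc + 1)]
      have h : pvCeil (n + 2) = pvCeil n + 1 := by simp only [pvCeil]; omega
      simp only [Prod.mk.injEq]
      refine ⟨?_, ?_, ?_⟩
      · rw [pvRowI_succ2]
        congr 2
        ring
      · rw [h, pvSeg_succ]
      · rw [h]; push_cast; ring

theorem pvLoopA_seg (n : Nat) : ∀ (st : Int) (link : List (Int × Int × Int)),
    pvLoopA (pvSeg st n) link (st + n) = (link ++ pvAllRows st n, pvTot st n) := by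
  induction n using Nat.strong_induction_on with
  | _ n IH =>
    intro st link
    by_cases h : n > 1
    · have hlen : (pvSeg st n).length = n := by simp [pvSeg]
      rw [pvLoopA, if_pos (by rw [hlen]; omega), pvInnerA_seg]
      have hrec := IH (pvCeil n) (by simp only [pvCeil]; omega) (st + n)
        (link ++ pvRowI (st + n) st n)
      rw [hrec]
      rw [show pvAllRows st n = pvRowI (st + n) st n ++ pvAllRows (st + n) (pvCeil n) from by
        rw [pvAllRows, if_pos h]]
      rw [show pvTot st n = pvTot (st + n) (pvCeil n) from by rw [pvTot, if_pos h]]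
      rw [List.append_assoc]
    · rw [pvLoopA, if_neg (by simp [pvSeg]; omega)]
      rw [show pvAllRows st n = [] from by rw [pvAllRows, if_neg h]]
      rw [show pvTot st n = st + n from by rw [pvTot, if_neg h]]
      rw [List.append_nil]

theorem pvBLoop_spec (n : Nat) : ∀ (st : Int),
    pvBLoop (n : Int) st = (pvLev st n, pvTot st n) := by
  induction n using Nat.strong_induction_on with
  | _ n IH =>
    intro st
    by_cases h : n > 1
    · have hfd : PySem.Int.floordiv ((n : Int) + 1) 2 = ((pvCeil n : Nat) : Int) := by
        have := PySem.Int.floordiv_natCast (n + 1) 2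
        simp only [pvCeil]; push_cast at this ⊢; exact this
      rw [pvBLoop, if_pos (by exact_mod_cast h), hfd,
        IH (pvCeil n) (by simp only [pvCeil]; omega) ((st + (n : Int)))]
      rw [show pvLev st n = ((n : Int), st) :: pvLev (st + n) (pvCeil n) from by
        rw [pvLev, if_pos h]]
      rw [show pvTot st n = pvTot (st + n) (pvCeil n) from by rw [pvTot, if_pos h]]
    · rw [pvBLoop, if_neg (by omega)]
      rw [show pvLev st n = [((n : Int), st)] from by rw [pvLev, if_neg h]]
      rw [show pvTot st n = st + n from by rw [pvTot, if_neg h]]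

theorem pvLev_head (st : Int) (n : Nat) : (pvLev st n).head? = some ((n : Int), st) := by
  rw [pvLev]; split <;> rfl

theorem pvBEmit_append : ∀ (l : List (Int × Int)) (z y : Int × Int),
    l.getLast? = some z →
    pvBEmit (l ++ [y]) = pvBEmit l ++ pvBRow z.1 z.2 y.1 y.2
  | [], z, y, h => by simp at h
  | [a], z, y, h => by
      obtain ⟨a1, a2⟩ := a; obtain ⟨y1, y2⟩ := y
      simp only [List.getLast?_singleton, Option.some.injEq] at h
      subst h; simp [pvBEmit]
  | a :: b :: rest, z, y, h => by
      obtain ⟨a1, a2⟩ := a; obtain ⟨b1, b2⟩ := b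
      rw [List.getLast?_cons_cons] at h
      have IH := pvBEmit_append ((b1, b2) :: rest) z y h
      show pvBEmit ((a1, a2) :: (b1, b2) :: (rest ++ [y])) = _
      simp only [pvBEmit]
      rw [List.cons_append] at IH
      rw [IH, List.append_assoc]

theorem pvRow_rel (st : Int) (m : Nat) :
    pvBRow ((pvCeil m : Nat) : Int) (st + m) (m : Int) st = (pvRowI (st + m) st m).reverse := by
  simp only [pvBRow, pvRowI, PySem.List.pyRange_one, ← List.map_reverse, List.map_map]
  congr 1
  · funext k
    simp only [Function.comp]
    by_cases hk : 2 * k + 1 < m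
    · rw [if_neg (by push_cast; omega), if_pos hk]
      simp only [Prod.mk.injEq]; exact ⟨by ring, by ring, by ring⟩
    · rw [if_pos (by push_cast; omega), if_neg hk]
      simp only [Prod.mk.injEq]; exact ⟨by ring, by ring, trivial⟩

theorem pvEmit_rel (m : Nat) : ∀ (st : Int),
    pvBEmit ((pvLev st m).reverse) = (pvAllRows st m).reverse := by
  induction m using Nat.strong_induction_on with
  | _ m IH =>
    intro st
    by_cases h : m > 1
    · rw [show pvLev st m = ((m : Int), st) :: pvLev (st + m) (pvCeil m) from by
        rw [pvLev, if_pos h]]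
      have hlast : ((pvLev (st + m) (pvCeil m)).reverse).getLast? =
          some (((pvCeil m : Nat) : Int), st + (m : Int)) := by
        rw [List.getLast?_reverse, pvLev_head]
      rw [List.reverse_cons,
        pvBEmit_append _ _ _ hlast,
        IH (pvCeil m) (by simp only [pvCeil]; omega) (st + m)]
      rw [show pvAllRows st m = pvRowI (st + m) st m ++ pvAllRows (st + m) (pvCeil m) from by
        rw [pvAllRows, if_pos h]]
      rw [List.reverse_append, pvRow_rel]
    · rw [show pvLev st m = [((m : Int), st)] from by rw [pvLev, if_neg h]]
      rw [show pvAllRows st m = [] from by rw [pvAllRows, if_neg h]]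
      simp [pvBEmit]

-- ===== VERDICT (by name: the statement is the Claim_ definition above) =====
theorem get_labeltree_spec : Claim_equal_get_labeltree := by
  intro n _
  unfold Spec_get_labeltree
  simp only [get_labeltree, get_labeltree_alt]
  by_cases h : n ≤ 1
  · have hnil : pvLoopA (PySem.List.pyRange 0 n 1) [] n = ([], n) := by
      rw [pvLoopA, if_neg (by rw [PySem.List.pyRange_one]; simp; omega)]
    rw [hnil, if_pos h]
    simp
  · rw [if_neg h]
    lift n to ℕ using (by omega : (0:ℤ) ≤ n) with m
    have hseg : PySem.List.pyRange 0 (m : Int) 1 = pvSeg 0 m := by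
      rw [PySem.List.pyRange_one, pvSeg]; norm_num
    have hloop := pvLoopA_seg m 0 []
    rw [zero_add] at hloop
    rw [hseg, hloop, pvBLoop_spec m 0]
    simp only [List.nil_append]
    exact congrArg₂ Prod.mk (pvEmit_rel m 0).symm rfl
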